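-- pv_equiv track=rewrite | github.com/mkaep/transformer-explainability | processtransformer/xai/metrics/run_through_xai_metrics.py | _get_index_pairs_for_n_threads
-- ===== SOURCE A (Python) =====
-- def _get_index_pairs_for_n_threads(n: int, length: int):
--     """
--     Fairly distribute indices among n threads for a list with length-elements.
--     Returns a list of pairs that indicate [start, stop).
--     E.g. n=3, length=8 returns [(0, 3), (3, 6), (6, 8)]
--     """
--     work_per_thread = length // n
--     remainder = length % n
--     if remainder == 0:
--         return [(i * work_per_thread, (i + 1) * work_per_thread) for i in range(n)]
--
--     work = []
--     last = 0
--     for i in range(n):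
--         if i < remainder:
--             end = work_per_thread + 1
--         else:
--             end = work_per_thread
--         work.append((last, last + end))
--         last += end
--     return work
-- ===== SOURCE B (Python) =====
-- def _get_index_pairs_for_n_threads(n: int, length: int):
--     """Closed form: block i starts at boundary(i) = i*(length//n) + min(i, length%n)."""
--     size, rem = divmod(length, n)
--
--     def boundary(i):
--         return i * size + min(i, rem)
--
--     return [(boundary(i), boundary(i + 1)) for i in range(n)]
-- ===== Notes on version B (the rewrite author's own statement) =====
-- stated objective: simpler
-- what changed: Replaces the accumulator loop with its remainder==0 special case by a single comprehension computing each boundary independently via the closed form i*(length//n) + min(i, length%n).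
import Mathlib
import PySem

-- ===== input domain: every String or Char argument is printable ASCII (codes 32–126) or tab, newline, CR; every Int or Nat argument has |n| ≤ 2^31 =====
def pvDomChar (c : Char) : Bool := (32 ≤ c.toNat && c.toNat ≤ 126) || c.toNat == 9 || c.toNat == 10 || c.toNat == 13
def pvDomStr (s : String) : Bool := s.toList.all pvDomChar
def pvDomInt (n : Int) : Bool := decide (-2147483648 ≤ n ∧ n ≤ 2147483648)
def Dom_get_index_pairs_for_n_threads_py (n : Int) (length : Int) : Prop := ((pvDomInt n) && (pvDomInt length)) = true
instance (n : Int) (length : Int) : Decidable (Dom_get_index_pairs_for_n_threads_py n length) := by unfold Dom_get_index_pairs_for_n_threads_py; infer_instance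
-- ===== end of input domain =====

-- B replaces A's accumulator loop (and its remainder==0 special case) by one comprehension
-- computing each boundary independently from the closed form i*(length//n) + min(i, length%n); objective: simpler.

-- ===== PORT A =====
def get_index_pairs_for_n_threads_py (n : Int) (length : Int) : List (Int × Int) :=
  let work_per_thread := PySem.Int.floordiv length n
  let remainder := PySem.Int.mod length n
  if remainder = 0 then
    (PySem.List.pyRange 0 n 1).map (fun i => (i * work_per_thread, (i + 1) * work_per_thread))
  else
    ((PySem.List.pyRange 0 n 1).foldl
      (fun (st : List (Int × Int) × Int) i =>
        let e := if i < remainder then work_per_thread + 1 else work_per_thread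
        (st.1 ++ [(st.2, st.2 + e)], st.2 + e))
      ([], 0)).1

-- ===== PORT B =====
def get_index_pairs_for_n_threads_py_alt (n : Int) (length : Int) : List (Int × Int) :=
  let size := PySem.Int.floordiv length n
  let rem := PySem.Int.mod length n
  let boundary := fun (i : Int) => i * size + min i rem
  (PySem.List.pyRange 0 n 1).map (fun i => (boundary i, boundary (i + 1)))

-- ===== PRECONDITION & SPEC =====
-- Pre_ excludes only n = 0, where Python A (and B) raise ZeroDivisionError.
def Pre_get_index_pairs_for_n_threads_py (n : Int) (length : Int) : Prop := n ≠ 0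
instance (n : Int) (length : Int) : Decidable (Pre_get_index_pairs_for_n_threads_py n length) := by unfold Pre_get_index_pairs_for_n_threads_py; infer_instance
def pvWitness_get_index_pairs_for_n_threads_py : Int × Int := (3, 8)
def Spec_get_index_pairs_for_n_threads_py (n : Int) (length : Int) (out : List (Int × Int)) : Prop := out = get_index_pairs_for_n_threads_py_alt n length
instance (n : Int) (length : Int) (out : List (Int × Int)) : Decidable (Spec_get_index_pairs_for_n_threads_py n length out) := by unfold Spec_get_index_pairs_for_n_threads_py; infer_instance

-- ===== CLAIM (what is proved, stated in full; the proofs are below) =====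
def Claim_equal_get_index_pairs_for_n_threads_py : Prop := ∀ (n : Int) (length : Int), Dom_get_index_pairs_for_n_threads_py n length → Pre_get_index_pairs_for_n_threads_py n length → Spec_get_index_pairs_for_n_threads_py n length (get_index_pairs_for_n_threads_py n length)

-- ===== LEMMAS AND PROOFS =====

-- The loop of A, run over range(0, k), builds exactly the closed-form pairs and ends at boundary k.
lemma loopA_closed (w r : Int) (hr0 : 0 ≤ r) (k : Nat) :
    (PySem.List.pyRange 0 (k : Int) 1).foldl
      (fun (st : List (Int × Int) × Int) i =>
        let e := if i < r then w + 1 else w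
        (st.1 ++ [(st.2, st.2 + e)], st.2 + e))
      ([], 0)
    = ((PySem.List.pyRange 0 (k : Int) 1).map
        (fun i => (i * w + min i r, (i + 1) * w + min (i + 1) r)),
       (k : Int) * w + min (k : Int) r) := by
  induction k with
  | zero => simp [PySem.List.pyRange_one_eq_nil, min_eq_left hr0]
  | succ k ih =>
    have hk : (0 : Int) ≤ (k : Int) := by positivity
    have hsplit : PySem.List.pyRange 0 ((k : Int) + 1) 1
        = PySem.List.pyRange 0 (k : Int) 1 ++ [(k : Int)] :=
      PySem.List.pyRange_one_succ_right hk
    push_cast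
    rw [hsplit, List.foldl_append, ih, List.map_append]
    simp only [List.foldl_cons, List.foldl_nil, List.map_cons, List.map_nil]
    refine Prod.ext ?_ ?_ <;> simp only
    · congr 1
      by_cases h : (k : Int) < r
      · rw [if_pos h, min_eq_left (by omega), min_eq_left (by omega)]
        simp only [List.cons.injEq, Prod.mk.injEq, and_true]
        exact ⟨trivial, by ring⟩
      · rw [if_neg h, min_eq_right (by omega), min_eq_right (by omega)]
        simp only [List.cons.injEq, Prod.mk.injEq, and_true]
        exact ⟨trivial, by ring⟩
    · by_cases h : (k : Int) < r
      · rw [if_pos h, min_eq_left (by omega), min_eq_left (by omega)]; ring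
      · rw [if_neg h, min_eq_right (by omega), min_eq_right (by omega)]; ring

-- ===== VERDICT (by name: the statement is the Claim_ definition above) =====
theorem get_index_pairs_for_n_threads_py_spec : Claim_equal_get_index_pairs_for_n_threads_py := by
  intro n length _ hn
  unfold Spec_get_index_pairs_for_n_threads_py
  unfold get_index_pairs_for_n_threads_py get_index_pairs_for_n_threads_py_alt
  simp only
  set w := PySem.Int.floordiv length n with hw
  set r := PySem.Int.mod length n with hr
  rcases lt_or_gt_of_ne hn with hneg | hpos
  · -- n < 0 : range(n) is empty on both sides
    have h0 : PySem.List.pyRange 0 n 1 = [] := PySem.List.pyRange_one_eq_nil (by omega)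
    by_cases hrz : r = 0 <;> simp [hrz, h0]
  · -- n > 0 : 0 ≤ r < n
    have hr0 : 0 ≤ r := by
      rw [hr]; unfold PySem.Int.mod; exact Int.fmod_nonneg_of_pos length hpos
    by_cases hrz : r = 0
    · -- A's special case: min i r = 0 for all i in the range
      rw [if_pos hrz]
      refine List.map_congr_left ?_
      intro i hi
      have hi0 : 0 ≤ i := ((PySem.List.mem_pyRange_one).1 hi).1
      rw [hrz]
      rw [min_eq_right hi0, min_eq_right (by omega)]
      simp
    · rw [if_neg hrz]
      have hn' : ((n.toNat : Int)) = n := Int.toNat_of_nonneg (by omega)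
      rw [← hn', loopA_closed w r hr0 n.toNat]
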